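-- pv_equiv track=rewrite | github.com/suhyun1019/Algorithm | Programmers/Lv1_문자열 나누기.py | solution
-- ===== SOURCE A (Python) =====
-- def solution(string):
--     answer = 0
--     temp = [0,0]    # 시작 문자 개수, 나머지 문자 개수
--     start = ''      # 시작 문자
--     for i, s in enumerate(string) :
--         if start=='' or start == s :    # 시작 문자와 동일할때
--             start = s
--             temp[0]+=1
--         else :                          # 시작 문자와 다를때
--             temp[1]+=1
--
--         if temp[0]==temp[1] :           # 개수가 같을때
--             answer+=1
--             temp = [0,0]
--             if i<len(string)-1 :
--                 start = string[i+1]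
--     if temp[0]!=temp[1] :
--         answer+=1
--     return answer
-- ===== SOURCE B (Python) =====
-- def solution(string):
--     # Different algorithm: instead of a running counter/balance scan, use the
--     # prefix-count characterization -- a group starting with character ref is
--     # complete at the smallest prefix length k where exactly half of the
--     # prefix's characters are ref (2 * prefix.count(ref) == k).  Repeatedly
--     # find that cut with the library count on slices and drop the group.
--     answer = 0
--     rest = string
--     while rest:
--         cut = len(rest)
--         for k in range(1, len(rest) + 1):
--             if 2 * rest[:k].count(rest[0]) == k:
--                 cut = k
--                 break
--         rest = rest[cut:]
--         answer += 1
--     return answer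
-- ===== Notes on version B (the rewrite author's own statement) =====
-- stated objective: alternative
-- what changed: Replaced A's stateful single pass (two-counter temp list, '' sentinel for the group's reference char, string[i+1] lookahead reset) by a group-cutting loop built on the prefix-count characterization: a group is complete at the smallest prefix length k with 2*prefix.count(ref)==k, found with the library slice/count and removed by slicing.
import Mathlib
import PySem

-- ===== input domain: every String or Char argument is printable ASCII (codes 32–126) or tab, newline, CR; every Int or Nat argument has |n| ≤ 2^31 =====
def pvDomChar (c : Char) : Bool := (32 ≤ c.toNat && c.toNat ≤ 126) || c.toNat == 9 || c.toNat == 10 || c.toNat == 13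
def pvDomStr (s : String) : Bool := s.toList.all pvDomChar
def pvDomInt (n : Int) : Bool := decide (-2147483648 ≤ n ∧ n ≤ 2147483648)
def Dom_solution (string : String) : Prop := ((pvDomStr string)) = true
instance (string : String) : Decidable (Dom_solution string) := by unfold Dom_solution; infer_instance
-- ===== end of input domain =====

-- B replaces A's stateful counter scan (temp pair, '' sentinel, string[i+1] lookahead) by the
-- prefix-count characterization of a group: the cut is the smallest k with 2*prefix.count(ref)==k,
-- found with the library count on slices; objective: alternative (same result, O(n^2) vs O(n)).

-- ===== PORT A =====
-- one step of A's for-loop; state = (answer, temp[0], temp[1], start); the '' sentinel for start is ported as none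
def solveStep (string : String) (st : Int × Int × Int × Option Char) (p : Int × Char) : Int × Int × Int × Option Char :=
  match st, p with
  | (answer, t0, t1, start), (i, s) =>
    let t0' := if start = none ∨ start = some s then t0 + 1 else t0
    let t1' := if start = none ∨ start = some s then t1 else t1 + 1
    let start' := if start = none ∨ start = some s then some s else start
    if t0' = t1' then
      -- answer+=1; temp=[0,0]; if i<len(string)-1: start = string[i+1]
      (answer + 1, 0, 0, if i < PySem.Str.len string - 1 then PySem.Str.pyGet? string (i + 1) else start')
    else (answer, t0', t1', start')

def solution (string : String) : Int :=
  let st := (PySem.List.enumerate string.toList 0).foldl (solveStep string) (0, 0, 0, (none : Option Char))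
  if st.2.1 ≠ st.2.2.1 then st.1 + 1 else st.1

-- ===== PORT B =====
-- Source B's inner for-loop over k in range(1, len(rest)+1): the first k with 2*rest[:k].count(rest[0])==k
def bFind (ref : Char) (l : List Char) : List Int → Option Int
  | [] => none
  | k :: ks =>
    if 2 * ((PySem.List.slice l none (some k)).count ref : Int) = k then some k
    else bFind ref l ks

-- termination helper for the outer while-loop of Source B (cut ≥ 1, so the rest strictly shrinks)
lemma bFind_mem {ref : Char} {l : List Char} : ∀ {ks : List Int} {k : Int}, bFind ref l ks = some k → k ∈ ks := by
  intro ks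
  induction ks with
  | nil => intro k h; simp [bFind] at h
  | cons a as ih =>
    intro k h
    simp only [bFind] at h
    split at h
    · cases h; exact List.mem_cons_self
    · exact List.mem_cons_of_mem _ (ih h)

lemma cut_lt (c : Char) (rest : List Char) :
    (PySem.List.slice (c :: rest)
      (some ((bFind c (c :: rest) (PySem.List.pyRange 1 (PySem.List.len (c :: rest) + 1) 1)).getD
        (PySem.List.len (c :: rest)))) none).length < (c :: rest).length := by
  have h1 : 1 ≤ (bFind c (c :: rest) (PySem.List.pyRange 1 (PySem.List.len (c :: rest) + 1) 1)).getD
        (PySem.List.len (c :: rest)) := by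
    rcases hf : bFind c (c :: rest) (PySem.List.pyRange 1 (PySem.List.len (c :: rest) + 1) 1) with _ | k
    · simp only [Option.getD_none, PySem.List.len_eq, List.length_cons]
      omega
    · simp only [Option.getD_some]
      exact (PySem.List.mem_pyRange_one.mp (bFind_mem hf)).1
  rw [PySem.List.slice_from (c :: rest)
      (a := (bFind c (c :: rest) (PySem.List.pyRange 1 (PySem.List.len (c :: rest) + 1) 1)).getD
        (PySem.List.len (c :: rest))) (by omega)]
  simp only [List.length_drop, List.length_cons]
  omega

-- Source B's outer while-loop: cut off one group per iteration, answer += 1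
def bOuter : List Char → Int → Int
  | [], answer => answer
  | c :: rest, answer =>
      bOuter (PySem.List.slice (c :: rest)
        (some ((bFind c (c :: rest) (PySem.List.pyRange 1 (PySem.List.len (c :: rest) + 1) 1)).getD
          (PySem.List.len (c :: rest)))) none) (answer + 1)
termination_by l _ => l.length
decreasing_by exact cut_lt c rest

def solution_alt (string : String) : Int := bOuter string.toList 0

-- ===== PRECONDITION & SPEC =====
def Spec_solution (string : String) (out : Int) : Prop := out = solution_alt string
instance (string : String) (out : Int) : Decidable (Spec_solution string out) := by unfold Spec_solution; infer_instance

-- ===== CLAIM (what is proved, stated in full; the proofs are below) =====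
def Claim_equal_solution : Prop := ∀ (string : String), Dom_solution string → Spec_solution string (solution string)

-- ===== LEMMAS AND PROOFS =====

-- A's loop, rewritten as structural recursion on the list of remaining characters
-- (the index i and the string[i+1] lookup are replaced by the shape of the suffix).
def aGo : List Char → Int → Int → Int → Option Char → Int
  | [], answer, t0, t1, _ => if t0 ≠ t1 then answer + 1 else answer
  | c :: rest, answer, t0, t1, start =>
    if start = none ∨ start = some c then
      if t0 + 1 = t1 then aGo rest (answer + 1) 0 0 (if rest = [] then some c else rest.head?)
      else aGo rest answer (t0 + 1) t1 (some c)
    else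
      if t0 = t1 + 1 then aGo rest (answer + 1) 0 0 (if rest = [] then start else rest.head?)
      else aGo rest answer t0 (t1 + 1) start

lemma bridgeA : ∀ (l pre : List Char) (string : String), string.toList = pre ++ l →
    ∀ (a t0 t1 : Int) (start : Option Char),
      (let st := (PySem.List.enumerate l (pre.length : Int)).foldl (solveStep string) (a, t0, t1, start)
       if st.2.1 ≠ st.2.2.1 then st.1 + 1 else st.1) = aGo l a t0 t1 start := by
  intro l
  induction l with
  | nil =>
    intro pre string h a t0 t1 start
    simp [PySem.List.enumerate_nil, aGo]
  | cons c rest ih =>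
    intro pre string h a t0 t1 start
    have hlen : string.toList.length = pre.length + 1 + rest.length := by
      simp [h]; omega
    have hget : PySem.Str.pyGet? string ((pre.length : Int) + 1) = rest.head? := by
      have : ((pre.length : Int) + 1) = ((pre.length + 1 : Nat) : Int) := by push_cast; ring
      rw [this, PySem.Str.pyGet?_natCast, h]
      rw [List.getElem?_append_right (by omega)]
      simp [List.head?_eq_getElem?]
    rw [PySem.List.enumerate_cons, List.foldl_cons]
    simp only [solveStep]
    by_cases hb : start = none ∨ start = some c
    · simp only [if_pos hb]
      by_cases heq : t0 + 1 = t1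
      · simp only [if_pos heq]
        by_cases hr : rest = []
        · subst hr
          have hlt : ¬ ((pre.length : Int) < PySem.Str.len string - 1) := by
            simp [PySem.Str.len_eq, hlen]
          simp only [if_neg hlt]
          have := ih (pre ++ [c]) string (by simp [h]) (a + 1) 0 0 (some c)
          simp only [List.length_append, List.length_singleton] at this
          rw [show ((pre.length + 1 : Nat) : Int) = (pre.length : Int) + 1 from by push_cast; ring] at this
          rw [this]
          simp [aGo, hb, heq]
        · have hlt : ((pre.length : Int) < PySem.Str.len string - 1) := by
            simp only [PySem.Str.len_eq, hlen]
            have : 0 < rest.length := List.length_pos_iff.mpr hr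
            push_cast; omega
          simp only [if_pos hlt, hget]
          have := ih (pre ++ [c]) string (by simp [h]) (a + 1) 0 0 rest.head?
          simp only [List.length_append, List.length_singleton] at this
          rw [show ((pre.length + 1 : Nat) : Int) = (pre.length : Int) + 1 from by push_cast; ring] at this
          rw [this]
          simp [aGo, hb, heq, hr]
      · simp only [if_neg heq]
        have := ih (pre ++ [c]) string (by simp [h]) a (t0 + 1) t1 (some c)
        simp only [List.length_append, List.length_singleton] at this
        rw [show ((pre.length + 1 : Nat) : Int) = (pre.length : Int) + 1 from by push_cast; ring] at this
        rw [this]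
        simp [aGo, hb, heq]
    · simp only [if_neg hb]
      by_cases heq : t0 = t1 + 1
      · simp only [if_pos heq]
        by_cases hr : rest = []
        · subst hr
          have hlt : ¬ ((pre.length : Int) < PySem.Str.len string - 1) := by
            simp [PySem.Str.len_eq, hlen]
          simp only [if_neg hlt]
          have := ih (pre ++ [c]) string (by simp [h]) (a + 1) 0 0 start
          simp only [List.length_append, List.length_singleton] at this
          rw [show ((pre.length + 1 : Nat) : Int) = (pre.length : Int) + 1 from by push_cast; ring] at this
          rw [this]
          simp [aGo, hb, heq]
        · have hlt : ((pre.length : Int) < PySem.Str.len string - 1) := by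
            simp only [PySem.Str.len_eq, hlen]
            have : 0 < rest.length := List.length_pos_iff.mpr hr
            push_cast; omega
          simp only [if_pos hlt, hget]
          have := ih (pre ++ [c]) string (by simp [h]) (a + 1) 0 0 rest.head?
          simp only [List.length_append, List.length_singleton] at this
          rw [show ((pre.length + 1 : Nat) : Int) = (pre.length : Int) + 1 from by push_cast; ring] at this
          rw [this]
          simp [aGo, hb, heq, hr]
      · simp only [if_neg heq]
        have := ih (pre ++ [c]) string (by simp [h]) a t0 (t1 + 1) start
        simp only [List.length_append, List.length_singleton] at this
        rw [show ((pre.length + 1 : Nat) : Int) = (pre.length : Int) + 1 from by push_cast; ring] at this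
        rw [this]
        simp [aGo, hb, heq]

-- reference "balance" scan: altInner consumes one group (returns the suffix after the first zero
-- of the running balance), altOuter counts groups; used only to connect the two ports.
def altInner (ref : Char) : List Char → Int → List Char
  | [], _ => []
  | c :: rest, diff =>
    let d := diff + (if c = ref then 1 else -1)
    if d = 0 then rest else altInner ref rest d

lemma altInner_length_le (ref : Char) : ∀ (l : List Char) (d : Int), (altInner ref l d).length ≤ l.length
  | [], _ => Nat.le_refl _
  | c :: rest, d => by
    simp only [altInner]
    split <;> split <;>
      first
        | exact Nat.le_succ _
        | exact Nat.le_succ_of_le (altInner_length_le ref rest _)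

def altOuter : List Char → Int → Int
  | [], answer => answer
  | c :: rest, answer => altOuter (altInner c (c :: rest) 0) (answer + 1)
termination_by l _ => l.length
decreasing_by
  simp only [altInner, zero_add]
  exact Nat.lt_succ_of_le (altInner_length_le _ rest 1)

-- Mutual invariant: (L1) inside a group with reference ref and balance t0 - t1 ≠ 0, A's
-- remaining run equals B's inner scan followed by the outer loop with answer + 1;
-- (L2) at a fresh group (counters 0, start either the sentinel or the next char) both agree.
lemma combined : ∀ (n : Nat) (l : List Char), l.length ≤ n →
    (∀ (a t0 t1 : Int) (ref : Char), t0 ≠ t1 →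
        aGo l a t0 t1 (some ref) = altOuter (altInner ref l (t0 - t1)) (a + 1)) ∧
    (∀ (a : Int) (s : Option Char), s = none ∨ s = l.head? → aGo l a 0 0 s = altOuter l a) := by
  intro n
  induction n with
  | zero =>
    intro l hl
    have : l = [] := List.eq_nil_of_length_eq_zero (Nat.le_zero.mp hl)
    subst this
    exact ⟨fun a t0 t1 ref hne => by simp [aGo, altInner, altOuter, hne],
           fun a s _ => by simp [aGo, altOuter]⟩
  | succ n ih =>
    intro l hl
    match l, hl with
    | [], _ =>
      exact ⟨fun a t0 t1 ref hne => by simp [aGo, altInner, altOuter, hne],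
             fun a s _ => by simp [aGo, altOuter]⟩
    | c :: rest, hl =>
      have hr : rest.length ≤ n := by simp at hl; omega
      constructor
      · intro a t0 t1 ref hne
        by_cases hc : c = ref
        · subst hc
          simp only [aGo, altInner, or_true, if_true]
          by_cases heq : t0 + 1 = t1
          · have hz : t0 - t1 + 1 = 0 := by omega
            simp only [if_pos heq, if_pos hz]
            cases rest with
            | nil => simp [aGo, altOuter]
            | cons c2 r2 =>
              rw [if_neg (by simp)]
              exact (ih _ hr).2 (a + 1) _ (Or.inr rfl)
          · have hz : ¬ (t0 - t1 + 1 = 0) := by omega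
            simp only [if_neg heq, if_neg hz]
            have h1 := (ih _ hr).1 a (t0 + 1) t1 c (by omega)
            rw [h1, show t0 + 1 - t1 = t0 - t1 + 1 from by ring]
        · have hcond : ¬ ((some ref : Option Char) = none ∨ (some ref : Option Char) = some c) := by
            simp
            exact fun h => hc h.symm
          simp only [aGo, altInner, if_neg hcond, if_neg hc]
          by_cases heq : t0 = t1 + 1
          · have hz : t0 - t1 + -1 = 0 := by omega
            simp only [if_pos heq, if_pos hz]
            cases rest with
            | nil => simp [aGo, altOuter]
            | cons c2 r2 =>
              rw [if_neg (by simp)]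
              exact (ih _ hr).2 (a + 1) _ (Or.inr rfl)
          · have hz : ¬ (t0 - t1 + -1 = 0) := by omega
            simp only [if_neg heq, if_neg hz]
            have h1 := (ih _ hr).1 a t0 (t1 + 1) ref (by omega)
            rw [h1, show t0 - (t1 + 1) = t0 - t1 + -1 from by ring]
      · intro a s hs
        have hcond : s = none ∨ s = some c := by simpa using hs
        simp only [aGo, altOuter, altInner, if_pos hcond]
        norm_num
        have h1 := (ih _ hr).1 a 1 0 c (by norm_num)
        norm_num at h1
        exact h1

-- length of one group as the balance scan consumes it
def cutLen (ref : Char) : List Char → Int → Nat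
  | [], _ => 0
  | c :: rest, d =>
    let d' := d + (if c = ref then 1 else -1)
    if d' = 0 then 1 else 1 + cutLen ref rest d'

lemma altInner_eq_drop (ref : Char) : ∀ (l : List Char) (d : Int), altInner ref l d = l.drop (cutLen ref l d)
  | [], _ => rfl
  | c :: rest, d => by
    simp only [altInner, cutLen]
    by_cases hz : d + (if c = ref then 1 else -1) = 0
    · rw [if_pos hz, if_pos hz]
      simp
    · rw [if_neg hz, if_neg hz, altInner_eq_drop ref rest _, Nat.add_comm 1 _, List.drop_succ_cons]

lemma cutLen_pos (ref : Char) (c : Char) (rest : List Char) (d : Int) : 1 ≤ cutLen ref (c :: rest) d := by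
  simp only [cutLen]
  by_cases hz : d + (if c = ref then 1 else -1) = 0
  · rw [if_pos hz]
  · rw [if_neg hz]
    exact Nat.le_add_right 1 _

-- the search of B's inner for-loop equals the balance scan's group length
lemma bFind_eq (ref : Char) (l : List Char) : ∀ (t : List Char) (m : Nat) (d : Int),
    t = l.drop m → m ≤ l.length → d = 2 * (((l.take m).count ref : Int)) - m →
    ((bFind ref l (PySem.List.pyRange ((m : Int) + 1) ((l.length : Int) + 1) 1)).getD (PySem.List.len l))
      = ((m + cutLen ref t d : Nat) : Int) := by
  intro t
  induction t with
  | nil =>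
    intro m d ht hm _
    have hml : m = l.length := by
      have := congrArg List.length ht
      simp at this
      omega
    rw [PySem.List.pyRange_one_eq_nil (by omega)]
    simp [bFind, cutLen, PySem.List.len_eq, hml]
  | cons ch t' ih =>
    intro m d ht hm hd
    have hlt : m < l.length := by
      have := congrArg List.length ht
      simp at this
      omega
    have hget : l[m]? = some ch := by
      have h0 : (l.drop m)[0]? = some ch := by rw [← ht]; rfl
      rw [List.getElem?_drop] at h0
      simpa using h0
    have htake : l.take (m + 1) = l.take m ++ [ch] := by
      rw [List.take_add_one, hget]
      rfl
    have hcnt : ((l.take (m + 1)).count ref : Int)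
        = ((l.take m).count ref : Int) + (if ch = ref then 1 else 0) := by
      rw [htake, List.count_append]
      push_cast
      congr 1
      by_cases hc : ch = ref <;> simp [hc]
    rw [PySem.List.pyRange_one_cons (by omega)]
    simp only [bFind]
    have hslice : PySem.List.slice l none (some ((m : Int) + 1)) = l.take (m + 1) := by
      rw [show ((m : Int) + 1) = ((m + 1 : Nat) : Int) from by push_cast; ring,
        PySem.List.slice_to_natCast]
    rw [hslice]
    by_cases hz : d + (if ch = ref then 1 else -1) = 0
    · have hcond : 2 * ((l.take (m + 1)).count ref : Int) = (m : Int) + 1 := by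
        rw [hcnt]
        by_cases hc : ch = ref <;> simp [hc] at hz ⊢ <;> omega
      rw [if_pos hcond]
      simp only [Option.getD_some, cutLen]
      rw [if_pos hz]
      push_cast
      ring
    · have hcond : ¬ (2 * ((l.take (m + 1)).count ref : Int) = (m : Int) + 1) := by
        rw [hcnt]
        by_cases hc : ch = ref <;> simp [hc] at hz ⊢ <;> omega
      rw [if_neg hcond]
      have ht' : t' = l.drop (m + 1) := by
        have h := congrArg List.tail ht
        simpa [List.tail_drop] using h
      have hd' : d + (if ch = ref then 1 else -1)
          = 2 * (((l.take (m + 1)).count ref : Int)) - (m + 1 : Nat) := by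
        rw [hcnt]
        by_cases hc : ch = ref <;> simp [hc] <;> omega
      have := ih (m + 1) (d + (if ch = ref then 1 else -1)) ht' (by omega) (by exact_mod_cast hd')
      rw [show ((m : Int) + 1 + 1) = (((m + 1 : Nat) : Int) + 1) from by push_cast; ring]
      rw [this]
      simp only [cutLen]
      rw [if_neg hz]
      push_cast
      ring

-- the two outer loops coincide: each cuts off the same group per iteration
lemma bOuter_eq_altOuter : ∀ (n : Nat) (l : List Char), l.length ≤ n → ∀ (a : Int),
    bOuter l a = altOuter l a := by
  intro n
  induction n with
  | zero =>
    intro l hl a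
    have : l = [] := List.eq_nil_of_length_eq_zero (Nat.le_zero.mp hl)
    subst this
    simp [bOuter, altOuter]
  | succ n ih =>
    intro l hl a
    match l, hl with
    | [], _ => simp [bOuter, altOuter]
    | c :: rest, hl =>
      have hfind := bFind_eq c (c :: rest) (c :: rest) 0 0 rfl (by simp) (by simp)
      simp only [Nat.cast_zero, zero_add, PySem.List.len_eq] at hfind
      rw [bOuter, altOuter]
      rw [show altInner c (c :: rest) 0 = (c :: rest).drop (cutLen c (c :: rest) 0) from
        altInner_eq_drop c (c :: rest) 0]
      simp only [PySem.List.len_eq]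
      rw [hfind, PySem.List.slice_from_natCast]
      apply ih
      have hpos := cutLen_pos c c rest 0
      simp only [List.length_drop, List.length_cons]
      simp only [List.length_cons] at hl
      omega

-- ===== VERDICT (by name: the statement is the Claim_ definition above) =====
theorem solution_spec : Claim_equal_solution := by
  intro string _
  unfold Spec_solution solution solution_alt
  have hb := bridgeA string.toList [] string (by simp) 0 0 0 none
  simp only [List.length_nil, Nat.cast_zero] at hb
  rw [hb]
  rw [(combined string.toList.length string.toList (Nat.le_refl _)).2 0 none (Or.inl rfl)]
  exact (bOuter_eq_altOuter string.toList.length string.toList (Nat.le_refl _) 0).symm
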